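-- pv_equiv track=rewrite | github.com/sujitmandal/Boinformatics | Rabbits_and_Recurrence_Relations.py | rabbit
-- ===== SOURCE A (Python) =====
-- def rabbit(n, k):
--     if n == 1:
--         return(1)
--     elif n == 2:
--         return(k)
--
--     oneGen = rabbit((n - 1), k)
--     twoGen = rabbit((n - 2), k)
--
--     if n <= 4:
--         add = (oneGen + twoGen)
--         return(add)
--
--     sequence = (oneGen + (twoGen * k))
--     return(sequence)
-- ===== SOURCE B (Python) =====
-- def rabbit(n, k):
--     if n == 1:
--         return 1
--     if n == 2:
--         return k
--     a, b = 1, k  # F(1), F(2)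
--     for i in range(3, n + 1):
--         a, b = b, (b + a if i <= 4 else b + a * k)
--     return b
-- ===== Notes on version B (the rewrite author's own statement) =====
-- stated objective: alternative
-- what changed: Replaces the doubly-recursive evaluation with a bottom-up two-variable loop computing the same recurrence (including A's n<=4 addition rule).
import Mathlib
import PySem

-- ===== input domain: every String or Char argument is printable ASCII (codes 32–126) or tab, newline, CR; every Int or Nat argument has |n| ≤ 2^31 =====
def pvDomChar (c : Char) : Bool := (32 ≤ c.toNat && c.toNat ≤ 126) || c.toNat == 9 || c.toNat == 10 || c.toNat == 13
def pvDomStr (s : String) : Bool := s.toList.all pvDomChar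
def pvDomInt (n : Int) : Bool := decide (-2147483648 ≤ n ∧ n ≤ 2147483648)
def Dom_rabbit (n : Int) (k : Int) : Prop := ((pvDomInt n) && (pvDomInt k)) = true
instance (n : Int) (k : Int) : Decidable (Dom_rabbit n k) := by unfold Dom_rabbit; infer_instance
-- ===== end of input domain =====

-- B: bottom-up two-variable iteration over the same recurrence (including A's n<=4 addition rule), replacing A's doubly-recursive evaluation.


-- ===== PORT A =====
-- literal port of A's recursion; A's two base cases are merged into one 'n ≤ 2' guard
-- solely so the recursion is well-founded in Lean (for n ≤ 0 Python A never returns —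
-- excluded by Pre_rabbit — so the value there is irrelevant).
def rabbit (n : Int) (k : Int) : Int :=
  if n ≤ 2 then (if n == 1 then 1 else k)
  else
    let oneGen := rabbit (n - 1) k
    let twoGen := rabbit (n - 2) k
    if n ≤ 4 then oneGen + twoGen
    else oneGen + twoGen * k
termination_by n.toNat
decreasing_by all_goals omega

-- ===== PORT B =====
-- the loop body of Source B: (a, b) -> (b, b + a  [i ≤ 4]  /  b + a*k  [i > 4])
def loopStep (k : Int) (p : Int × Int) (i : Int) : Int × Int :=
  (p.2, if i ≤ 4 then p.2 + p.1 else p.2 + p.1 * k)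

def rabbit_alt (n : Int) (k : Int) : Int :=
  if n == 1 then 1
  else if n == 2 then k
  else
    ((PySem.List.pyRange 3 (n + 1) 1).foldl (loopStep k) (1, k)).2

-- ===== PRECONDITION & SPEC =====
-- Pre_ excludes n ≤ 0, where Python A recurses forever (RecursionError); A returns on every n ≥ 1.
def Pre_rabbit (n : Int) (k : Int) : Prop := 1 ≤ n
instance (n : Int) (k : Int) : Decidable (Pre_rabbit n k) := by unfold Pre_rabbit; infer_instance
def pvWitness_rabbit : Int × Int := (6, 3)

def Spec_rabbit (n : Int) (k : Int) (out : Int) : Prop := out = rabbit_alt n k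
instance (n : Int) (k : Int) (out : Int) : Decidable (Spec_rabbit n k out) := by unfold Spec_rabbit; infer_instance

-- ===== CLAIM (what is proved, stated in full; the proofs are below) =====
def Claim_equal_rabbit : Prop := ∀ (n : Int) (k : Int), Dom_rabbit n k → Pre_rabbit n k → Spec_rabbit n k (rabbit n k)

-- ===== LEMMAS AND PROOFS =====

-- A's recursive step, for n ≥ 3
lemma rabbit_rec (n k : Int) (h : 3 ≤ n) :
    rabbit n k = if n ≤ 4 then rabbit (n - 1) k + rabbit (n - 2) k
                 else rabbit (n - 1) k + rabbit (n - 2) k * k := by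
  rw [rabbit, if_neg (by omega : ¬ n ≤ 2)]

-- loop state after processing range(3, n+1), for n ≥ 2, is (rabbit (n-1) k, rabbit n k)
lemma loop_invariant (k : Int) (m : Nat) :
    ((PySem.List.pyRange 3 ((m : Int) + 2 + 1) 1).foldl (loopStep k) (1, k))
      = (rabbit ((m : Int) + 1) k, rabbit ((m : Int) + 2) k) := by
  induction m with
  | zero =>
      rw [PySem.List.pyRange_one_eq_nil (by norm_num)]
      simp [rabbit]
  | succ m ih =>
      push_cast
      have h3 : (3 : Int) ≤ (m : Int) + 2 + 1 := by omega
      rw [show ((m : Int) + 1 + 2 + 1) = ((m : Int) + 2 + 1) + 1 by ring,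
          PySem.List.pyRange_one_succ_right h3, List.foldl_append, ih]
      simp only [List.foldl, loopStep]
      have hrec := rabbit_rec ((m : Int) + 1 + 2) k (by omega)
      rw [show ((m : Int) + 1 + 2 - 1) = (m : Int) + 2 by ring,
          show ((m : Int) + 1 + 2 - 2) = (m : Int) + 1 by ring] at hrec
      rw [Prod.mk.injEq]
      refine ⟨by congr 1, ?_⟩
      rw [show ((m : Int) + 2 + 1) = (m : Int) + 1 + 2 by ring, ← hrec]

-- ===== VERDICT (by name: the statement is the Claim_ definition above) =====
theorem rabbit_spec : Claim_equal_rabbit := by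
  intro n k _ hpre
  unfold Spec_rabbit rabbit_alt
  by_cases h1 : n = 1
  · subst h1; rw [rabbit]; norm_num
  · by_cases h2 : n = 2
    · subst h2; rw [rabbit]; norm_num
    · have hn : 3 ≤ n := by unfold Pre_rabbit at hpre; omega
      obtain ⟨m, hm⟩ : ∃ m : Nat, n = (m : Int) + 2 := ⟨(n - 2).toNat, by omega⟩
      subst hm
      rw [if_neg (by simpa using h1), if_neg (by simpa using h2)]
      rw [loop_invariant k m]
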